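-- pv_equiv track=rewrite | github.com/ZakirCodeArchitect/PakistanHigherCourtsSearchAndQASystem | backend/law_information_project/law_information/management/commands/extract_detailed_law_info.py | generate_generic_punishment
-- ===== SOURCE A (Python) =====
-- def generate_generic_punishment(law_title):
--     """Generate generic punishment based on law title"""
--     title_lower = law_title.lower()
--
--     if any(word in title_lower for word in ['murder', 'homicide']):
--         return "Death penalty or imprisonment for life, and fine."
--     elif any(word in title_lower for word in ['theft', 'robbery']):
--         return "Imprisonment up to 3-7 years, or fine, or both."
--     elif any(word in title_lower for word in ['fraud', 'cheating']):
--         return "Imprisonment up to 7 years, and fine."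
--     elif any(word in title_lower for word in ['assault', 'hurt']):
--         return "Imprisonment up to 3-10 years, or fine, or both."
--     elif any(word in title_lower for word in ['rape', 'sexual']):
--         return "Imprisonment for life or 10-25 years, and fine."
--     elif any(word in title_lower for word in ['narcotics', 'drugs']):
--         return "Imprisonment up to 14 years, and fine."
--     elif any(word in title_lower for word in ['terrorism', 'anti-terrorism']):
--         return "Imprisonment up to 14 years, and fine."
--     elif any(word in title_lower for word in ['blasphemy', 'religious']):
--         return "Imprisonment up to 2 years, or fine, or both."
--     elif any(word in title_lower for word in ['counterfeit', 'currency']):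
--         return "Imprisonment for life or up to 10 years, and fine."
--     elif any(word in title_lower for word in ['breach', 'trust']):
--         return "Imprisonment up to 3 years, or fine, or both."
--     else:
--         return "Punishment as prescribed under the relevant provisions of the law."
-- ===== SOURCE B (Python) =====
-- # B: instead of searching the title for each keyword, enumerate every substring of the
-- # lowercased title up to the maximum keyword length and look it up in one keyword->rank
-- # hash table, keeping the smallest (highest-priority) rank seen; index a punishment list.
-- KEYWORD_RANK = {
--     'murder': 0, 'homicide': 0,
--     'theft': 1, 'robbery': 1,
--     'fraud': 2, 'cheating': 2,
--     'assault': 3, 'hurt': 3,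
--     'rape': 4, 'sexual': 4,
--     'narcotics': 5, 'drugs': 5,
--     'terrorism': 6, 'anti-terrorism': 6,
--     'blasphemy': 7, 'religious': 7,
--     'counterfeit': 8, 'currency': 8,
--     'breach': 9, 'trust': 9,
-- }
--
-- MAX_KEYWORD_LEN = 14  # len('anti-terrorism')
--
-- PUNISHMENTS = [
--     "Death penalty or imprisonment for life, and fine.",
--     "Imprisonment up to 3-7 years, or fine, or both.",
--     "Imprisonment up to 7 years, and fine.",
--     "Imprisonment up to 3-10 years, or fine, or both.",
--     "Imprisonment for life or 10-25 years, and fine.",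
--     "Imprisonment up to 14 years, and fine.",
--     "Imprisonment up to 14 years, and fine.",
--     "Imprisonment up to 2 years, or fine, or both.",
--     "Imprisonment for life or up to 10 years, and fine.",
--     "Imprisonment up to 3 years, or fine, or both.",
--     "Punishment as prescribed under the relevant provisions of the law.",
-- ]
--
-- def generate_generic_punishment(law_title):
--     t = law_title.lower()
--     n = len(t)
--     best = 10
--     for i in range(n):
--         for j in range(i + 1, min(i + MAX_KEYWORD_LEN, n) + 1):
--             r = KEYWORD_RANK.get(t[i:j])
--             if r is not None and r < best:
--                 best = r
--     return PUNISHMENTS[best]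
-- ===== Notes on version B (the rewrite author's own statement) =====
-- stated objective: alternative
-- what changed: Instead of running a substring search over the title for each keyword in an elif ladder, B enumerates every substring of the lowercased title up to the maximal keyword length (14), looks each up in a single keyword-to-rank hash table, keeps the minimum rank seen, and indexes a punishment list with it.
import Mathlib
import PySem

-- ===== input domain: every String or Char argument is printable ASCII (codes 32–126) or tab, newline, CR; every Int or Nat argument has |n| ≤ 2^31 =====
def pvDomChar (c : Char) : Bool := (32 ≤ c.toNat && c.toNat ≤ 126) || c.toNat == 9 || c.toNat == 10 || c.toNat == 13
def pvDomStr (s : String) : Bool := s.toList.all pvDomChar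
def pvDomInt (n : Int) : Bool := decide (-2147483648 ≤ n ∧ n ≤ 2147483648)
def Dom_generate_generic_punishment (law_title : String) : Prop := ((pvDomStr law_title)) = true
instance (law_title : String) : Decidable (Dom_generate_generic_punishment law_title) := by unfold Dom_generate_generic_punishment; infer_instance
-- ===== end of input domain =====

-- B replaces the per-keyword substring searches by enumerating every substring of the
-- lowercased title up to the maximal keyword length and looking it up in one
-- keyword→rank table, keeping the smallest rank (alternative algorithm, same results).

-- ===== PORT A =====
def generate_generic_punishment (law_title : String) : String :=
  let title_lower := PySem.Str.lower law_title
  if ["murder", "homicide"].any (fun word => PySem.Str.isIn word title_lower) then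
    "Death penalty or imprisonment for life, and fine."
  else if ["theft", "robbery"].any (fun word => PySem.Str.isIn word title_lower) then
    "Imprisonment up to 3-7 years, or fine, or both."
  else if ["fraud", "cheating"].any (fun word => PySem.Str.isIn word title_lower) then
    "Imprisonment up to 7 years, and fine."
  else if ["assault", "hurt"].any (fun word => PySem.Str.isIn word title_lower) then
    "Imprisonment up to 3-10 years, or fine, or both."
  else if ["rape", "sexual"].any (fun word => PySem.Str.isIn word title_lower) then
    "Imprisonment for life or 10-25 years, and fine."
  else if ["narcotics", "drugs"].any (fun word => PySem.Str.isIn word title_lower) then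
    "Imprisonment up to 14 years, and fine."
  else if ["terrorism", "anti-terrorism"].any (fun word => PySem.Str.isIn word title_lower) then
    "Imprisonment up to 14 years, and fine."
  else if ["blasphemy", "religious"].any (fun word => PySem.Str.isIn word title_lower) then
    "Imprisonment up to 2 years, or fine, or both."
  else if ["counterfeit", "currency"].any (fun word => PySem.Str.isIn word title_lower) then
    "Imprisonment for life or up to 10 years, and fine."
  else if ["breach", "trust"].any (fun word => PySem.Str.isIn word title_lower) then
    "Imprisonment up to 3 years, or fine, or both."
  else
    "Punishment as prescribed under the relevant provisions of the law."

-- ===== PORT B =====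
def KEYPAIRS : List (List Char × Int) :=
  [ ("murder".toList, 0), ("homicide".toList, 0),
    ("theft".toList, 1), ("robbery".toList, 1),
    ("fraud".toList, 2), ("cheating".toList, 2),
    ("assault".toList, 3), ("hurt".toList, 3),
    ("rape".toList, 4), ("sexual".toList, 4),
    ("narcotics".toList, 5), ("drugs".toList, 5),
    ("terrorism".toList, 6), ("anti-terrorism".toList, 6),
    ("blasphemy".toList, 7), ("religious".toList, 7),
    ("counterfeit".toList, 8), ("currency".toList, 8),
    ("breach".toList, 9), ("trust".toList, 9) ]

def KEYWORD_RANK : PySem.Dict (List Char) Int := PySem.Dict.ofList KEYPAIRS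

def MAX_KEYWORD_LEN : Int := 14  -- len('anti-terrorism')

def PUNISHMENTS : List String :=
  [ "Death penalty or imprisonment for life, and fine.",
    "Imprisonment up to 3-7 years, or fine, or both.",
    "Imprisonment up to 7 years, and fine.",
    "Imprisonment up to 3-10 years, or fine, or both.",
    "Imprisonment for life or 10-25 years, and fine.",
    "Imprisonment up to 14 years, and fine.",
    "Imprisonment up to 14 years, and fine.",
    "Imprisonment up to 2 years, or fine, or both.",
    "Imprisonment for life or up to 10 years, and fine.",
    "Imprisonment up to 3 years, or fine, or both.",
    "Punishment as prescribed under the relevant provisions of the law." ]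

def generate_generic_punishment_alt (law_title : String) : String :=
  let t : List Char := (PySem.Str.lower law_title).toList
  let n : Int := t.length
  let best : Int :=
    (PySem.List.pyRange 0 n 1).foldl (fun b i =>
      (PySem.List.pyRange (i + 1) (min (i + MAX_KEYWORD_LEN) n + 1) 1).foldl (fun b j =>
        match KEYWORD_RANK.get? (PySem.List.slice t (some i) (some j)) with
        | some r => if r < b then r else b
        | none => b) b) 10
  -- best always lies in [0, 10], so PUNISHMENTS[best] never raises; .getD "" totalizes
  (PySem.List.pyGet? PUNISHMENTS best).getD ""

-- ===== PRECONDITION & SPEC =====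
def Spec_generate_generic_punishment (law_title : String) (out : String) : Prop := out = generate_generic_punishment_alt law_title
instance (law_title : String) (out : String) : Decidable (Spec_generate_generic_punishment law_title out) := by unfold Spec_generate_generic_punishment; infer_instance

-- ===== CLAIM (what is proved, stated in full; the proofs are below) =====
def Claim_equal_generate_generic_punishment : Prop := ∀ (law_title : String), Dom_generate_generic_punishment law_title → Spec_generate_generic_punishment law_title (generate_generic_punishment law_title)

-- ===== LEMMAS AND PROOFS =====

-- the running-minimum step of B's inner loop
def minStep {β : Type} (k : β → Option Int) (b : Int) (x : β) : Int :=
  match k x with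
  | some r => if r < b then r else b
  | none => b

-- lookup function and flattened index-pair list of B's two nested loops
def pvK (t : List Char) (p : Int × Int) : Option Int :=
  KEYWORD_RANK.get? (PySem.List.slice t (some p.1) (some p.2))

def pvPairs (t : List Char) : List (Int × Int) :=
  (PySem.List.pyRange 0 (t.length : Int) 1).flatMap (fun i =>
    (PySem.List.pyRange (i + 1) (min (i + MAX_KEYWORD_LEN) (t.length : Int) + 1) 1).map (fun j => (i, j)))

def pvBest (t : List Char) : Int := (pvPairs t).foldl (minStep (pvK t)) 10

lemma foldl_flatMap {α β γ : Type} (g : α → List β) (f : γ → β → γ) (L : List α) (init : γ) :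
    (L.flatMap g).foldl f init = L.foldl (fun b a => (g a).foldl f b) init := by
  induction L generalizing init with
  | nil => rfl
  | cons hd tl ih => simp [List.flatMap_cons, List.foldl_append, ih]

-- B's nested loops compute exactly the flattened running minimum pvBest
lemma alt_eq_pvBest (law_title : String) :
    generate_generic_punishment_alt law_title
      = (PySem.List.pyGet? PUNISHMENTS (pvBest (PySem.Str.lower law_title).toList)).getD "" := by
  unfold generate_generic_punishment_alt pvBest pvPairs
  rw [foldl_flatMap]
  simp only [List.foldl_map]
  rfl

lemma foldl_minStep_le {β : Type} (k : β → Option Int) (L : List β) (b : Int) :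
    L.foldl (minStep k) b ≤ b := by
  induction L generalizing b with
  | nil => simp
  | cons hd tl ih =>
    refine le_trans (ih (minStep k b hd)) ?_
    unfold minStep; cases k hd with
    | none => simp
    | some r => simp only; split <;> omega

lemma foldl_minStep_le_of_mem {β : Type} (k : β → Option Int) (L : List β) (b : Int)
    (x : β) (r : Int) (hx : x ∈ L) (hk : k x = some r) :
    L.foldl (minStep k) b ≤ r := by
  induction L generalizing b with
  | nil => cases hx
  | cons hd tl ih =>
    rcases List.mem_cons.mp hx with h | h
    · subst h
      refine le_trans (foldl_minStep_le k tl (minStep k b x)) ?_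
      unfold minStep; rw [hk]; simp only; split <;> omega
    · exact ih _ h

lemma foldl_minStep_mem {β : Type} (k : β → Option Int) (L : List β) (b : Int) :
    L.foldl (minStep k) b = b ∨ ∃ x ∈ L, k x = some (L.foldl (minStep k) b) := by
  induction L generalizing b with
  | nil => exact Or.inl rfl
  | cons hd tl ih =>
    rcases ih (minStep k b hd) with h | ⟨x, hx, hk⟩
    · simp only [List.foldl_cons, h]
      unfold minStep; cases hkk : k hd with
      | none => exact Or.inl rfl
      | some r =>
        simp only; split
        · exact Or.inr ⟨hd, List.mem_cons_self, by rw [hkk]⟩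
        · exact Or.inl rfl
    · exact Or.inr ⟨x, List.mem_cons_of_mem _ hx, hk⟩

lemma get?_mk_mem {κ ν : Type} [BEq κ] [LawfulBEq κ] (ps : List (κ × ν)) (x : κ) (v : ν)
    (h : (PySem.Dict.mk ps).get? x = some v) : (x, v) ∈ ps := by
  induction ps with
  | nil => simp [PySem.Dict.get?] at h
  | cons hd tl ih =>
    obtain ⟨k, w⟩ := hd
    rw [PySem.Dict.get?_mk_cons] at h
    by_cases hk : k == x
    · rw [if_pos hk] at h
      exact List.mem_cons.mpr (Or.inl (by rw [← (beq_iff_eq).mp hk]; injection h with h; rw [h]))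
    · rw [if_neg hk] at h
      exact List.mem_cons_of_mem _ (ih h)

lemma keyword_rank_eq_mk : KEYWORD_RANK = PySem.Dict.mk KEYPAIRS := by decide

lemma keypair_facts : ∀ p ∈ KEYPAIRS,
    KEYWORD_RANK.get? p.1 = some p.2 ∧ p.1 ≠ [] ∧ (p.1.length : Int) ≤ 14 ∧ 0 ≤ p.2 ∧ p.2 ≤ 9 := by
  decide

lemma mem_pvPairs {t : List Char} {i j : Int} :
    (i, j) ∈ pvPairs t ↔
      (0 ≤ i ∧ i < (t.length : Int)) ∧ (i + 1 ≤ j ∧ j < min (i + 14) (t.length : Int) + 1) := by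
  unfold pvPairs MAX_KEYWORD_LEN
  simp only [List.mem_flatMap, List.mem_map, PySem.List.mem_pyRange_one, Prod.mk.injEq]
  constructor
  · rintro ⟨a, ha, b, hb, rfl, rfl⟩
    exact ⟨ha, hb⟩
  · rintro ⟨hi, hj⟩
    exact ⟨i, hi, j, hj, rfl, rfl⟩

lemma slice_isInfix (t : List Char) (i j : Int) (h0 : 0 ≤ i) (h1 : 0 ≤ j) :
    PySem.List.slice t (some i) (some j) <:+: t := by
  rw [PySem.List.slice_toNat t h0 h1]
  exact ((List.take_prefix _ _).isInfix).trans ((List.drop_suffix _ _).isInfix)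

lemma isInfix_slice {w t : List Char} (hne : w ≠ []) (hlen : (w.length : Int) ≤ 14)
    (h : w <:+: t) :
    ∃ i j : Int, (i, j) ∈ pvPairs t ∧ PySem.List.slice t (some i) (some j) = w := by
  obtain ⟨u, v, huv⟩ := h
  subst huv
  have hlw : 0 < w.length := List.length_pos_iff.mpr hne
  refine ⟨(u.length : Int), ((u.length + w.length : Nat) : Int), ?_, ?_⟩
  · rw [mem_pvPairs]
    simp only [List.length_append]
    push_cast
    omega
  · rw [PySem.List.slice_natCast]
    have h1 : u.length + w.length - u.length = w.length := by omega
    rw [h1, List.append_assoc, List.drop_left, List.take_left]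

lemma pvBest_le_of_keyword (t : List Char) (w : List Char) (r : Int)
    (hmem : (w, r) ∈ KEYPAIRS) (hin : PySem.Chars.isIn w t = true) :
    pvBest t ≤ r := by
  obtain ⟨hget, hne, hlen, _, _⟩ := keypair_facts (w, r) hmem
  obtain ⟨i, j, hp, hs⟩ := isInfix_slice hne hlen ((PySem.Chars.isIn_iff_infix w t).mp hin)
  exact foldl_minStep_le_of_mem (pvK t) (pvPairs t) 10 (i, j) r hp (by unfold pvK; rw [hs]; exact hget)

lemma pvBest_cases (t : List Char) :
    pvBest t = 10 ∨ ∃ w, (w, pvBest t) ∈ KEYPAIRS ∧ PySem.Chars.isIn w t = true := by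
  rcases foldl_minStep_mem (pvK t) (pvPairs t) 10 with h | ⟨⟨i, j⟩, hmem, hk⟩
  · exact Or.inl h
  · right
    unfold pvK at hk
    have hmem' := get?_mk_mem KEYPAIRS _ _ (keyword_rank_eq_mk ▸ hk)
    refine ⟨_, hmem', ?_⟩
    rw [PySem.Chars.isIn_iff_infix]
    have hb := (mem_pvPairs.mp hmem).1
    have hb2 := (mem_pvPairs.mp hmem).2
    exact slice_isInfix t i j hb.1 (by omega)

lemma pvBest_le_ten (t : List Char) : pvBest t ≤ 10 :=
  foldl_minStep_le (pvK t) (pvPairs t) 10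

-- pvBest is the least matched rank (10 when nothing matches)
lemma pvBest_val (t : List Char) (c : Int) (hc : 0 ≤ c ∧ c ≤ 10)
    (hmatch : c = 10 ∨ ∃ w, (w, c) ∈ KEYPAIRS ∧ PySem.Chars.isIn w t = true)
    (hnone : ∀ w r, (w, r) ∈ KEYPAIRS → r < c → PySem.Chars.isIn w t = false) :
    pvBest t = c := by
  have hle : pvBest t ≤ c := by
    rcases hmatch with rfl | ⟨w, hmem, hin⟩
    · exact pvBest_le_ten t
    · exact pvBest_le_of_keyword t w c hmem hin
  have hge : c ≤ pvBest t := by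
    rcases pvBest_cases t with h | ⟨w, hmem, hin⟩
    · omega
    · by_contra hlt
      have := hnone w (pvBest t) hmem (by omega)
      rw [hin] at this; cases this
  omega

lemma isIn_false_of_not_or_left {a b : Bool} (h : ¬(a = true ∨ b = true)) : a = false := by
  cases a
  · rfl
  · exact absurd (Or.inl rfl) h

lemma isIn_false_of_not_or_right {a b : Bool} (h : ¬(a = true ∨ b = true)) : b = false := by
  cases b
  · rfl
  · exact absurd (Or.inr rfl) h

-- ===== VERDICT (by name: the statement is the Claim_ definition above) =====
set_option maxHeartbeats 3200000 in
theorem generate_generic_punishment_spec : Claim_equal_generate_generic_punishment := by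
  intro law_title _
  unfold Spec_generate_generic_punishment
  rw [alt_eq_pvBest]
  unfold generate_generic_punishment
  simp only [List.any_cons, List.any_nil, Bool.or_false, PySem.Str.isIn_eq, Bool.or_eq_true]
  set s := PySem.Str.lower law_title with hs
  split_ifs with h0 h1 h2 h3 h4 h5 h6 h7 h8 h9
  · have hn : ∀ w r, (w, r) ∈ KEYPAIRS → r < 0 → PySem.Chars.isIn w s.toList = false := by
      intro w r hm hr
      simp only [KEYPAIRS, List.mem_cons, Prod.mk.injEq, List.not_mem_nil, or_false] at hm
      rcases hm with ⟨rfl, rfl⟩|⟨rfl, rfl⟩|⟨rfl, rfl⟩|⟨rfl, rfl⟩|⟨rfl, rfl⟩|⟨rfl, rfl⟩|⟨rfl, rfl⟩|⟨rfl, rfl⟩|⟨rfl, rfl⟩|⟨rfl, rfl⟩|⟨rfl, rfl⟩|⟨rfl, rfl⟩|⟨rfl, rfl⟩|⟨rfl, rfl⟩|⟨rfl, rfl⟩|⟨rfl, rfl⟩|⟨rfl, rfl⟩|⟨rfl, rfl⟩|⟨rfl, rfl⟩|⟨rfl, rfl⟩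
      · exact absurd hr (by omega)
      · exact absurd hr (by omega)
      · exact absurd hr (by omega)
      · exact absurd hr (by omega)
      · exact absurd hr (by omega)
      · exact absurd hr (by omega)
      · exact absurd hr (by omega)
      · exact absurd hr (by omega)
      · exact absurd hr (by omega)
      · exact absurd hr (by omega)
      · exact absurd hr (by omega)
      · exact absurd hr (by omega)
      · exact absurd hr (by omega)
      · exact absurd hr (by omega)
      · exact absurd hr (by omega)
      · exact absurd hr (by omega)
      · exact absurd hr (by omega)
      · exact absurd hr (by omega)
      · exact absurd hr (by omega)
      · exact absurd hr (by omega)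
    rcases h0 with hw | hw
    · rw [pvBest_val s.toList 0 (by omega) (Or.inr ⟨_, by decide, hw⟩) hn]; rfl
    · rw [pvBest_val s.toList 0 (by omega) (Or.inr ⟨_, by decide, hw⟩) hn]; rfl
  · have hn : ∀ w r, (w, r) ∈ KEYPAIRS → r < 1 → PySem.Chars.isIn w s.toList = false := by
      intro w r hm hr
      simp only [KEYPAIRS, List.mem_cons, Prod.mk.injEq, List.not_mem_nil, or_false] at hm
      rcases hm with ⟨rfl, rfl⟩|⟨rfl, rfl⟩|⟨rfl, rfl⟩|⟨rfl, rfl⟩|⟨rfl, rfl⟩|⟨rfl, rfl⟩|⟨rfl, rfl⟩|⟨rfl, rfl⟩|⟨rfl, rfl⟩|⟨rfl, rfl⟩|⟨rfl, rfl⟩|⟨rfl, rfl⟩|⟨rfl, rfl⟩|⟨rfl, rfl⟩|⟨rfl, rfl⟩|⟨rfl, rfl⟩|⟨rfl, rfl⟩|⟨rfl, rfl⟩|⟨rfl, rfl⟩|⟨rfl, rfl⟩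
      · exact isIn_false_of_not_or_left h0
      · exact isIn_false_of_not_or_right h0
      · exact absurd hr (by omega)
      · exact absurd hr (by omega)
      · exact absurd hr (by omega)
      · exact absurd hr (by omega)
      · exact absurd hr (by omega)
      · exact absurd hr (by omega)
      · exact absurd hr (by omega)
      · exact absurd hr (by omega)
      · exact absurd hr (by omega)
      · exact absurd hr (by omega)
      · exact absurd hr (by omega)
      · exact absurd hr (by omega)
      · exact absurd hr (by omega)
      · exact absurd hr (by omega)
      · exact absurd hr (by omega)
      · exact absurd hr (by omega)
      · exact absurd hr (by omega)
      · exact absurd hr (by omega)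
    rcases h1 with hw | hw
    · rw [pvBest_val s.toList 1 (by omega) (Or.inr ⟨_, by decide, hw⟩) hn]; rfl
    · rw [pvBest_val s.toList 1 (by omega) (Or.inr ⟨_, by decide, hw⟩) hn]; rfl
  · have hn : ∀ w r, (w, r) ∈ KEYPAIRS → r < 2 → PySem.Chars.isIn w s.toList = false := by
      intro w r hm hr
      simp only [KEYPAIRS, List.mem_cons, Prod.mk.injEq, List.not_mem_nil, or_false] at hm
      rcases hm with ⟨rfl, rfl⟩|⟨rfl, rfl⟩|⟨rfl, rfl⟩|⟨rfl, rfl⟩|⟨rfl, rfl⟩|⟨rfl, rfl⟩|⟨rfl, rfl⟩|⟨rfl, rfl⟩|⟨rfl, rfl⟩|⟨rfl, rfl⟩|⟨rfl, rfl⟩|⟨rfl, rfl⟩|⟨rfl, rfl⟩|⟨rfl, rfl⟩|⟨rfl, rfl⟩|⟨rfl, rfl⟩|⟨rfl, rfl⟩|⟨rfl, rfl⟩|⟨rfl, rfl⟩|⟨rfl, rfl⟩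
      · exact isIn_false_of_not_or_left h0
      · exact isIn_false_of_not_or_right h0
      · exact isIn_false_of_not_or_left h1
      · exact isIn_false_of_not_or_right h1
      · exact absurd hr (by omega)
      · exact absurd hr (by omega)
      · exact absurd hr (by omega)
      · exact absurd hr (by omega)
      · exact absurd hr (by omega)
      · exact absurd hr (by omega)
      · exact absurd hr (by omega)
      · exact absurd hr (by omega)
      · exact absurd hr (by omega)
      · exact absurd hr (by omega)
      · exact absurd hr (by omega)
      · exact absurd hr (by omega)
      · exact absurd hr (by omega)
      · exact absurd hr (by omega)
      · exact absurd hr (by omega)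
      · exact absurd hr (by omega)
    rcases h2 with hw | hw
    · rw [pvBest_val s.toList 2 (by omega) (Or.inr ⟨_, by decide, hw⟩) hn]; rfl
    · rw [pvBest_val s.toList 2 (by omega) (Or.inr ⟨_, by decide, hw⟩) hn]; rfl
  · have hn : ∀ w r, (w, r) ∈ KEYPAIRS → r < 3 → PySem.Chars.isIn w s.toList = false := by
      intro w r hm hr
      simp only [KEYPAIRS, List.mem_cons, Prod.mk.injEq, List.not_mem_nil, or_false] at hm
      rcases hm with ⟨rfl, rfl⟩|⟨rfl, rfl⟩|⟨rfl, rfl⟩|⟨rfl, rfl⟩|⟨rfl, rfl⟩|⟨rfl, rfl⟩|⟨rfl, rfl⟩|⟨rfl, rfl⟩|⟨rfl, rfl⟩|⟨rfl, rfl⟩|⟨rfl, rfl⟩|⟨rfl, rfl⟩|⟨rfl, rfl⟩|⟨rfl, rfl⟩|⟨rfl, rfl⟩|⟨rfl, rfl⟩|⟨rfl, rfl⟩|⟨rfl, rfl⟩|⟨rfl, rfl⟩|⟨rfl, rfl⟩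
      · exact isIn_false_of_not_or_left h0
      · exact isIn_false_of_not_or_right h0
      · exact isIn_false_of_not_or_left h1
      · exact isIn_false_of_not_or_right h1
      · exact isIn_false_of_not_or_left h2
      · exact isIn_false_of_not_or_right h2
      · exact absurd hr (by omega)
      · exact absurd hr (by omega)
      · exact absurd hr (by omega)
      · exact absurd hr (by omega)
      · exact absurd hr (by omega)
      · exact absurd hr (by omega)
      · exact absurd hr (by omega)
      · exact absurd hr (by omega)
      · exact absurd hr (by omega)
      · exact absurd hr (by omega)
      · exact absurd hr (by omega)
      · exact absurd hr (by omega)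
      · exact absurd hr (by omega)
      · exact absurd hr (by omega)
    rcases h3 with hw | hw
    · rw [pvBest_val s.toList 3 (by omega) (Or.inr ⟨_, by decide, hw⟩) hn]; rfl
    · rw [pvBest_val s.toList 3 (by omega) (Or.inr ⟨_, by decide, hw⟩) hn]; rfl
  · have hn : ∀ w r, (w, r) ∈ KEYPAIRS → r < 4 → PySem.Chars.isIn w s.toList = false := by
      intro w r hm hr
      simp only [KEYPAIRS, List.mem_cons, Prod.mk.injEq, List.not_mem_nil, or_false] at hm
      rcases hm with ⟨rfl, rfl⟩|⟨rfl, rfl⟩|⟨rfl, rfl⟩|⟨rfl, rfl⟩|⟨rfl, rfl⟩|⟨rfl, rfl⟩|⟨rfl, rfl⟩|⟨rfl, rfl⟩|⟨rfl, rfl⟩|⟨rfl, rfl⟩|⟨rfl, rfl⟩|⟨rfl, rfl⟩|⟨rfl, rfl⟩|⟨rfl, rfl⟩|⟨rfl, rfl⟩|⟨rfl, rfl⟩|⟨rfl, rfl⟩|⟨rfl, rfl⟩|⟨rfl, rfl⟩|⟨rfl, rfl⟩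
      · exact isIn_false_of_not_or_left h0
      · exact isIn_false_of_not_or_right h0
      · exact isIn_false_of_not_or_left h1
      · exact isIn_false_of_not_or_right h1
      · exact isIn_false_of_not_or_left h2
      · exact isIn_false_of_not_or_right h2
      · exact isIn_false_of_not_or_left h3
      · exact isIn_false_of_not_or_right h3
      · exact absurd hr (by omega)
      · exact absurd hr (by omega)
      · exact absurd hr (by omega)
      · exact absurd hr (by omega)
      · exact absurd hr (by omega)
      · exact absurd hr (by omega)
      · exact absurd hr (by omega)
      · exact absurd hr (by omega)
      · exact absurd hr (by omega)
      · exact absurd hr (by omega)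
      · exact absurd hr (by omega)
      · exact absurd hr (by omega)
    rcases h4 with hw | hw
    · rw [pvBest_val s.toList 4 (by omega) (Or.inr ⟨_, by decide, hw⟩) hn]; rfl
    · rw [pvBest_val s.toList 4 (by omega) (Or.inr ⟨_, by decide, hw⟩) hn]; rfl
  · have hn : ∀ w r, (w, r) ∈ KEYPAIRS → r < 5 → PySem.Chars.isIn w s.toList = false := by
      intro w r hm hr
      simp only [KEYPAIRS, List.mem_cons, Prod.mk.injEq, List.not_mem_nil, or_false] at hm
      rcases hm with ⟨rfl, rfl⟩|⟨rfl, rfl⟩|⟨rfl, rfl⟩|⟨rfl, rfl⟩|⟨rfl, rfl⟩|⟨rfl, rfl⟩|⟨rfl, rfl⟩|⟨rfl, rfl⟩|⟨rfl, rfl⟩|⟨rfl, rfl⟩|⟨rfl, rfl⟩|⟨rfl, rfl⟩|⟨rfl, rfl⟩|⟨rfl, rfl⟩|⟨rfl, rfl⟩|⟨rfl, rfl⟩|⟨rfl, rfl⟩|⟨rfl, rfl⟩|⟨rfl, rfl⟩|⟨rfl, rfl⟩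
      · exact isIn_false_of_not_or_left h0
      · exact isIn_false_of_not_or_right h0
      · exact isIn_false_of_not_or_left h1
      · exact isIn_false_of_not_or_right h1
      · exact isIn_false_of_not_or_left h2
      · exact isIn_false_of_not_or_right h2
      · exact isIn_false_of_not_or_left h3
      · exact isIn_false_of_not_or_right h3
      · exact isIn_false_of_not_or_left h4
      · exact isIn_false_of_not_or_right h4
      · exact absurd hr (by omega)
      · exact absurd hr (by omega)
      · exact absurd hr (by omega)
      · exact absurd hr (by omega)
      · exact absurd hr (by omega)
      · exact absurd hr (by omega)
      · exact absurd hr (by omega)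
      · exact absurd hr (by omega)
      · exact absurd hr (by omega)
      · exact absurd hr (by omega)
    rcases h5 with hw | hw
    · rw [pvBest_val s.toList 5 (by omega) (Or.inr ⟨_, by decide, hw⟩) hn]; rfl
    · rw [pvBest_val s.toList 5 (by omega) (Or.inr ⟨_, by decide, hw⟩) hn]; rfl
  · have hn : ∀ w r, (w, r) ∈ KEYPAIRS → r < 6 → PySem.Chars.isIn w s.toList = false := by
      intro w r hm hr
      simp only [KEYPAIRS, List.mem_cons, Prod.mk.injEq, List.not_mem_nil, or_false] at hm
      rcases hm with ⟨rfl, rfl⟩|⟨rfl, rfl⟩|⟨rfl, rfl⟩|⟨rfl, rfl⟩|⟨rfl, rfl⟩|⟨rfl, rfl⟩|⟨rfl, rfl⟩|⟨rfl, rfl⟩|⟨rfl, rfl⟩|⟨rfl, rfl⟩|⟨rfl, rfl⟩|⟨rfl, rfl⟩|⟨rfl, rfl⟩|⟨rfl, rfl⟩|⟨rfl, rfl⟩|⟨rfl, rfl⟩|⟨rfl, rfl⟩|⟨rfl, rfl⟩|⟨rfl, rfl⟩|⟨rfl, rfl⟩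
      · exact isIn_false_of_not_or_left h0
      · exact isIn_false_of_not_or_right h0
      · exact isIn_false_of_not_or_left h1
      · exact isIn_false_of_not_or_right h1
      · exact isIn_false_of_not_or_left h2
      · exact isIn_false_of_not_or_right h2
      · exact isIn_false_of_not_or_left h3
      · exact isIn_false_of_not_or_right h3
      · exact isIn_false_of_not_or_left h4
      · exact isIn_false_of_not_or_right h4
      · exact isIn_false_of_not_or_left h5
      · exact isIn_false_of_not_or_right h5
      · exact absurd hr (by omega)
      · exact absurd hr (by omega)
      · exact absurd hr (by omega)
      · exact absurd hr (by omega)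
      · exact absurd hr (by omega)
      · exact absurd hr (by omega)
      · exact absurd hr (by omega)
      · exact absurd hr (by omega)
    rcases h6 with hw | hw
    · rw [pvBest_val s.toList 6 (by omega) (Or.inr ⟨_, by decide, hw⟩) hn]; rfl
    · rw [pvBest_val s.toList 6 (by omega) (Or.inr ⟨_, by decide, hw⟩) hn]; rfl
  · have hn : ∀ w r, (w, r) ∈ KEYPAIRS → r < 7 → PySem.Chars.isIn w s.toList = false := by
      intro w r hm hr
      simp only [KEYPAIRS, List.mem_cons, Prod.mk.injEq, List.not_mem_nil, or_false] at hm
      rcases hm with ⟨rfl, rfl⟩|⟨rfl, rfl⟩|⟨rfl, rfl⟩|⟨rfl, rfl⟩|⟨rfl, rfl⟩|⟨rfl, rfl⟩|⟨rfl, rfl⟩|⟨rfl, rfl⟩|⟨rfl, rfl⟩|⟨rfl, rfl⟩|⟨rfl, rfl⟩|⟨rfl, rfl⟩|⟨rfl, rfl⟩|⟨rfl, rfl⟩|⟨rfl, rfl⟩|⟨rfl, rfl⟩|⟨rfl, rfl⟩|⟨rfl, rfl⟩|⟨rfl, rfl⟩|⟨rfl, rfl⟩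
      · exact isIn_false_of_not_or_left h0
      · exact isIn_false_of_not_or_right h0
      · exact isIn_false_of_not_or_left h1
      · exact isIn_false_of_not_or_right h1
      · exact isIn_false_of_not_or_left h2
      · exact isIn_false_of_not_or_right h2
      · exact isIn_false_of_not_or_left h3
      · exact isIn_false_of_not_or_right h3
      · exact isIn_false_of_not_or_left h4
      · exact isIn_false_of_not_or_right h4
      · exact isIn_false_of_not_or_left h5
      · exact isIn_false_of_not_or_right h5
      · exact isIn_false_of_not_or_left h6
      · exact isIn_false_of_not_or_right h6
      · exact absurd hr (by omega)
      · exact absurd hr (by omega)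
      · exact absurd hr (by omega)
      · exact absurd hr (by omega)
      · exact absurd hr (by omega)
      · exact absurd hr (by omega)
    rcases h7 with hw | hw
    · rw [pvBest_val s.toList 7 (by omega) (Or.inr ⟨_, by decide, hw⟩) hn]; rfl
    · rw [pvBest_val s.toList 7 (by omega) (Or.inr ⟨_, by decide, hw⟩) hn]; rfl
  · have hn : ∀ w r, (w, r) ∈ KEYPAIRS → r < 8 → PySem.Chars.isIn w s.toList = false := by
      intro w r hm hr
      simp only [KEYPAIRS, List.mem_cons, Prod.mk.injEq, List.not_mem_nil, or_false] at hm
      rcases hm with ⟨rfl, rfl⟩|⟨rfl, rfl⟩|⟨rfl, rfl⟩|⟨rfl, rfl⟩|⟨rfl, rfl⟩|⟨rfl, rfl⟩|⟨rfl, rfl⟩|⟨rfl, rfl⟩|⟨rfl, rfl⟩|⟨rfl, rfl⟩|⟨rfl, rfl⟩|⟨rfl, rfl⟩|⟨rfl, rfl⟩|⟨rfl, rfl⟩|⟨rfl, rfl⟩|⟨rfl, rfl⟩|⟨rfl, rfl⟩|⟨rfl, rfl⟩|⟨rfl, rfl⟩|⟨rfl, rfl⟩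
      · exact isIn_false_of_not_or_left h0
      · exact isIn_false_of_not_or_right h0
      · exact isIn_false_of_not_or_left h1
      · exact isIn_false_of_not_or_right h1
      · exact isIn_false_of_not_or_left h2
      · exact isIn_false_of_not_or_right h2
      · exact isIn_false_of_not_or_left h3
      · exact isIn_false_of_not_or_right h3
      · exact isIn_false_of_not_or_left h4
      · exact isIn_false_of_not_or_right h4
      · exact isIn_false_of_not_or_left h5
      · exact isIn_false_of_not_or_right h5
      · exact isIn_false_of_not_or_left h6
      · exact isIn_false_of_not_or_right h6
      · exact isIn_false_of_not_or_left h7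
      · exact isIn_false_of_not_or_right h7
      · exact absurd hr (by omega)
      · exact absurd hr (by omega)
      · exact absurd hr (by omega)
      · exact absurd hr (by omega)
    rcases h8 with hw | hw
    · rw [pvBest_val s.toList 8 (by omega) (Or.inr ⟨_, by decide, hw⟩) hn]; rfl
    · rw [pvBest_val s.toList 8 (by omega) (Or.inr ⟨_, by decide, hw⟩) hn]; rfl
  · have hn : ∀ w r, (w, r) ∈ KEYPAIRS → r < 9 → PySem.Chars.isIn w s.toList = false := by
      intro w r hm hr
      simp only [KEYPAIRS, List.mem_cons, Prod.mk.injEq, List.not_mem_nil, or_false] at hm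
      rcases hm with ⟨rfl, rfl⟩|⟨rfl, rfl⟩|⟨rfl, rfl⟩|⟨rfl, rfl⟩|⟨rfl, rfl⟩|⟨rfl, rfl⟩|⟨rfl, rfl⟩|⟨rfl, rfl⟩|⟨rfl, rfl⟩|⟨rfl, rfl⟩|⟨rfl, rfl⟩|⟨rfl, rfl⟩|⟨rfl, rfl⟩|⟨rfl, rfl⟩|⟨rfl, rfl⟩|⟨rfl, rfl⟩|⟨rfl, rfl⟩|⟨rfl, rfl⟩|⟨rfl, rfl⟩|⟨rfl, rfl⟩
      · exact isIn_false_of_not_or_left h0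
      · exact isIn_false_of_not_or_right h0
      · exact isIn_false_of_not_or_left h1
      · exact isIn_false_of_not_or_right h1
      · exact isIn_false_of_not_or_left h2
      · exact isIn_false_of_not_or_right h2
      · exact isIn_false_of_not_or_left h3
      · exact isIn_false_of_not_or_right h3
      · exact isIn_false_of_not_or_left h4
      · exact isIn_false_of_not_or_right h4
      · exact isIn_false_of_not_or_left h5
      · exact isIn_false_of_not_or_right h5
      · exact isIn_false_of_not_or_left h6
      · exact isIn_false_of_not_or_right h6
      · exact isIn_false_of_not_or_left h7
      · exact isIn_false_of_not_or_right h7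
      · exact isIn_false_of_not_or_left h8
      · exact isIn_false_of_not_or_right h8
      · exact absurd hr (by omega)
      · exact absurd hr (by omega)
    rcases h9 with hw | hw
    · rw [pvBest_val s.toList 9 (by omega) (Or.inr ⟨_, by decide, hw⟩) hn]; rfl
    · rw [pvBest_val s.toList 9 (by omega) (Or.inr ⟨_, by decide, hw⟩) hn]; rfl
  · have hn : ∀ w r, (w, r) ∈ KEYPAIRS → r < 10 → PySem.Chars.isIn w s.toList = false := by
      intro w r hm hr
      simp only [KEYPAIRS, List.mem_cons, Prod.mk.injEq, List.not_mem_nil, or_false] at hm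
      rcases hm with ⟨rfl, rfl⟩|⟨rfl, rfl⟩|⟨rfl, rfl⟩|⟨rfl, rfl⟩|⟨rfl, rfl⟩|⟨rfl, rfl⟩|⟨rfl, rfl⟩|⟨rfl, rfl⟩|⟨rfl, rfl⟩|⟨rfl, rfl⟩|⟨rfl, rfl⟩|⟨rfl, rfl⟩|⟨rfl, rfl⟩|⟨rfl, rfl⟩|⟨rfl, rfl⟩|⟨rfl, rfl⟩|⟨rfl, rfl⟩|⟨rfl, rfl⟩|⟨rfl, rfl⟩|⟨rfl, rfl⟩
      · exact isIn_false_of_not_or_left h0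
      · exact isIn_false_of_not_or_right h0
      · exact isIn_false_of_not_or_left h1
      · exact isIn_false_of_not_or_right h1
      · exact isIn_false_of_not_or_left h2
      · exact isIn_false_of_not_or_right h2
      · exact isIn_false_of_not_or_left h3
      · exact isIn_false_of_not_or_right h3
      · exact isIn_false_of_not_or_left h4
      · exact isIn_false_of_not_or_right h4
      · exact isIn_false_of_not_or_left h5
      · exact isIn_false_of_not_or_right h5
      · exact isIn_false_of_not_or_left h6
      · exact isIn_false_of_not_or_right h6
      · exact isIn_false_of_not_or_left h7
      · exact isIn_false_of_not_or_right h7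
      · exact isIn_false_of_not_or_left h8
      · exact isIn_false_of_not_or_right h8
      · exact isIn_false_of_not_or_left h9
      · exact isIn_false_of_not_or_right h9
    rw [pvBest_val s.toList 10 (by omega) (Or.inl rfl) hn]; rfl
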